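-- pv_equiv track=rewrite | github.com/mdrakibislam68/insurance-backend | utils/helpers.py | convert_date_format
-- ===== SOURCE A (Python) =====
-- def convert_date_format(format_str):
--     replacements = {
--         'd': 'dd',
--         'm': 'mm',
--         'Y': 'yyyy'
--     }
--
--     for short, long in replacements.items():
--         format_str = format_str.replace(short, long)
--
--     return format_str
-- ===== SOURCE B (Python) =====
-- def convert_date_format(format_str):
--     table = {'d': 'dd', 'm': 'mm', 'Y': 'yyyy'}
--     return ''.join(table.get(c, c) for c in format_str)
-- ===== Notes on version B (the rewrite author's own statement) =====
-- stated objective: idiomatic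
-- what changed: Replaces three sequential full-string .replace scans with a single character pass emitting table.get(c, c) for each char, joined once.
import Mathlib
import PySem

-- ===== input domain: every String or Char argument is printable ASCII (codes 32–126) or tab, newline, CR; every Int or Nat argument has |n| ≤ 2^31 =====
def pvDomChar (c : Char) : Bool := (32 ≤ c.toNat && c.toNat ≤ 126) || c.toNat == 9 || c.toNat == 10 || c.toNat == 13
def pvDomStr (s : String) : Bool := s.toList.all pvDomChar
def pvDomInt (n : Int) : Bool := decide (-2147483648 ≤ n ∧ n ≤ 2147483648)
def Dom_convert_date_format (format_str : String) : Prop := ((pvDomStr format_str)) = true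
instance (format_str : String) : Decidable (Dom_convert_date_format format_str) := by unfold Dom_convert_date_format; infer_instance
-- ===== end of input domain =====

-- B replaces A's three sequential full-string .replace passes with a single per-character
-- table-lookup pass joined once (idiomatic); proved equal on all of Dom.


-- ===== PORT A =====
-- Port of A: iterate the replacement dict's items, doing a full-string .replace per rule.
def convert_date_format (format_str : String) : String :=
  let replacements : PySem.Dict String String :=
    PySem.Dict.ofList [("d", "dd"), ("m", "mm"), ("Y", "yyyy")]
  replacements.items.foldl (fun s kv => PySem.Str.replace s kv.1 kv.2) format_str

-- ===== PORT B =====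
-- Port of B: one pass over the characters, emitting table.get(c, c), joined once.
def convert_date_format_alt (format_str : String) : String :=
  let table : PySem.Dict Char String :=
    PySem.Dict.ofList [('d', "dd"), ('m', "mm"), ('Y', "yyyy")]
  PySem.Str.join "" (format_str.toList.map (fun c => table.getD c (String.ofList [c])))

-- ===== PRECONDITION & SPEC =====
def Spec_convert_date_format (format_str : String) (out : String) : Prop := out = convert_date_format_alt format_str
instance (format_str : String) (out : String) : Decidable (Spec_convert_date_format format_str out) := by unfold Spec_convert_date_format; infer_instance

-- ===== CLAIM (what is proved, stated in full; the proofs are below) =====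
def Claim_equal_convert_date_format : Prop := ∀ (format_str : String), Dom_convert_date_format format_str → Spec_convert_date_format format_str (convert_date_format format_str)

-- ===== LEMMAS AND PROOFS =====

-- replacing a single-character pattern is a per-character flatMap
lemma replace_go_single (o : Char) (new : List Char) :
    ∀ (fuel : Nat) (l acc : List Char), l.length ≤ fuel →
      PySem.Chars.replace.go [o] new fuel l acc
        = acc.reverse ++ l.flatMap (fun c => if c = o then new else [c]) := by
  intro fuel
  induction fuel with
  | zero =>
      intro l acc h
      have : l = [] := List.eq_nil_of_length_eq_zero (Nat.le_zero.mp h)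
      subst this
      simp [PySem.Chars.replace.go]
  | succ f ih =>
      intro l acc h
      cases l with
      | nil => simp [PySem.Chars.replace.go]
      | cons c t =>
          by_cases hc : c = o
          · subst hc
            have hpre : List.isPrefixOf [c] (c :: t) = true := by
              simp [List.isPrefixOf]
            rw [PySem.Chars.replace.go, if_pos hpre]
            have ht : t.length ≤ f := by simpa using Nat.le_of_succ_le_succ h
            simp only [List.length_cons, List.length_nil, List.drop_succ_cons, List.drop_zero]
            rw [ih _ _ ht]
            simp
          · have hpre : List.isPrefixOf [o] (c :: t) = false := by
              simp [List.isPrefixOf]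
              intro h'; exact absurd h'.symm hc
            rw [PySem.Chars.replace.go, if_neg (by simp [hpre])]
            have ht : t.length ≤ f := by simpa using Nat.le_of_succ_le_succ h
            rw [ih _ _ ht]
            simp [hc]

lemma replace_single (o : Char) (new s : List Char) :
    PySem.Chars.replace s [o] new = s.flatMap (fun c => if c = o then new else [c]) := by
  rw [PySem.Chars.replace]
  simp [replace_go_single o new s.length s [] (le_refl _)]

-- ===== VERDICT (by name: the statement is the Claim_ definition above) =====
lemma intercalate_nil (l : List (List Char)) : [].intercalate l = l.flatten := by
  induction l with
  | nil => rfl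
  | cons a t ih => simp [List.intercalate] at *; cases t <;> simp_all [List.intersperse]

lemma getD_table (c : Char) (dflt : String) :
    (PySem.Dict.ofList [('d', "dd"), ('m', "mm"), ('Y', "yyyy")] : PySem.Dict Char String).getD c dflt
      = if c = 'd' then "dd" else if c = 'm' then "mm" else if c = 'Y' then "yyyy" else dflt := by
  have htab : (PySem.Dict.ofList [('d', "dd"), ('m', "mm"), ('Y', "yyyy")] : PySem.Dict Char String)
      = PySem.Dict.mk [('d', "dd"), ('m', "mm"), ('Y', "yyyy")] := by decide
  rw [htab]
  by_cases h1 : c = 'd'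
  · subst h1; simp [PySem.Dict.getD, PySem.Dict.get?_mk_cons]
  · by_cases h2 : c = 'm'
    · subst h2; simp [PySem.Dict.getD, PySem.Dict.get?_mk_cons]
    · by_cases h3 : c = 'Y'
      · subst h3; simp [PySem.Dict.getD, PySem.Dict.get?_mk_cons]
      · simp [PySem.Dict.getD, PySem.Dict.get?, Ne.symm h1, Ne.symm h2, Ne.symm h3, h1, h2, h3]

theorem convert_date_format_spec : Claim_equal_convert_date_format := by
  intro s _
  unfold Spec_convert_date_format convert_date_format convert_date_format_alt
  have hitems : (PySem.Dict.ofList [("d", "dd"), ("m", "mm"), ("Y", "yyyy")] : PySem.Dict String String).items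
      = [("d", "dd"), ("m", "mm"), ("Y", "yyyy")] := by decide
  simp only []
  rw [hitems]
  simp only [List.foldl]
  apply String.toList_inj.mp
  simp only [PySem.Str.toList_replace, PySem.Str.toList_join]
  simp only [show ("d" : String).toList = ['d'] from rfl, show ("dd" : String).toList = ['d','d'] from rfl,
    show ("m" : String).toList = ['m'] from rfl, show ("mm" : String).toList = ['m','m'] from rfl,
    show ("Y" : String).toList = ['Y'] from rfl, show ("yyyy" : String).toList = ['y','y','y','y'] from rfl,
    show ("" : String).toList = ([] : List Char) from rfl]
  simp only [replace_single, List.flatMap_assoc, List.map_map, PySem.Chars.join,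
    intercalate_nil, List.flatten_eq_flatMap, List.flatMap_map]
  congr 1
  funext c
  simp only [id, Function.comp, getD_table]
  by_cases h1 : c = 'd'
  · subst h1; rfl
  · by_cases h2 : c = 'm'
    · subst h2; rfl
    · by_cases h3 : c = 'Y'
      · subst h3; rfl
      · simp [h1, h2, h3]
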